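-- pv_equiv track=rewrite | github.com/LuizFrL/Organizar_Hoteis | Organização dos Hoteis.py | returnNiv_Hot
-- ===== SOURCE A (Python) =====
-- def remove_repetidos(lista):
--     l = []
--     for i in lista:
--         if i not in l:
--             l.append(i)
--     l.sort()
--     return l
--
-- def returnNiv_Hot(hot):
--     nivel = 4
--     nivel_hotel = { }
--     geral = []
--
--     auxiliar = []
--
--     for index, hote in enumerate(hot):
--         if hot[index - 1] < hote:
--             auxiliar.append(hote)
--         else:
--             geral.append(auxiliar)
--             auxiliar = [hote]
--     geral.append(auxiliar)
--
--     nivel_1 = []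
--
--     for ni in geral:
--         if not ni: continue
--         nivel_hotel[nivel] = remove_repetidos(ni)
--         if nivel == 1:
--             nivel_1.extend(ni)
--             nivel_hotel[nivel] = nivel_1
--             continue
--         nivel -= 1
--
--     return nivel_hotel
-- ===== SOURCE B (Python) =====
-- def returnNiv_Hot(hot):
--     buckets = {}
--     rid = 0
--     for i, x in enumerate(hot):
--         if i > 0 and hot[i - 1] >= x:
--             rid += 1
--         buckets.setdefault(max(4 - rid, 1), []).append(x)
--     return {k: sorted(set(v)) if k > 1 else v for k, v in buckets.items()}
-- ===== Notes on version B (the rewrite author's own statement) =====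
-- stated objective: alternative
-- what changed: B never builds the runs A accumulates: it labels each element in one pass with a running descent counter (rid increments whenever hot[i-1] >= hot[i]), buckets elements directly under the level key max(4-rid,1) as it goes, and finishes with a per-key post-pass (sorted set for keys 4..2, raw list for key 1), replacing A's run-list construction plus second loop with its level countdown and remove_repetidos membership scan.
import Mathlib
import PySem

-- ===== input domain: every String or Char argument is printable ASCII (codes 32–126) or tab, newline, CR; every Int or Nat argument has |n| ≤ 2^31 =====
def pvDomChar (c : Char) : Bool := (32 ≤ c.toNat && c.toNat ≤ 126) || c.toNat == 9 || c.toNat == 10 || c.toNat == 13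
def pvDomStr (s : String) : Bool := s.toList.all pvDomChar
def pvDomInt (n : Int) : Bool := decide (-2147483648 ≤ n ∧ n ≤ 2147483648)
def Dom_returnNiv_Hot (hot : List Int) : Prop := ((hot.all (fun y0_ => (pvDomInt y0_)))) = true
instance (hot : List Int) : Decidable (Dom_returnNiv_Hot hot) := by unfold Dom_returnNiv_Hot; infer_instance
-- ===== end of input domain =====

-- B replaces A's explicit run construction (accumulator list + second loop with level countdown and
-- remove_repetidos) by one labeling pass — a running descent counter assigns each element its level key
-- max(4-rid,1) and buckets it — followed by a per-key post-pass (sorted set for keys > 1, raw for key 1);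
-- objective: alternative decomposition, same exact return value.

-- ===== PORT A =====
-- remove_repetidos: dedup keeping first occurrences, then sort ascending
def remove_repetidos (lista : List Int) : List Int :=
  PySem.List.sorted (lista.foldl (fun l i => if l.contains i then l else l ++ [i]) []) (fun x => x) false

-- loop body of A's first for-loop; p = (index, hote); hot[index-1] is always in range (index-1 ∈ [-1, len-2],
-- hot nonempty whenever the loop runs), so the .getD 0 default is never used
def rnhStep (hot : List Int) (s : List (List Int) × List Int) (p : Int × Int) :
    List (List Int) × List Int :=
  if (PySem.List.pyGet? hot (p.1 - 1)).getD 0 < p.2 then (s.1, s.2 ++ [p.2])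
  else (s.1 ++ [s.2], [p.2])

-- loop body of A's second for-loop; state = (nivel_hotel, nivel, nivel_1)
def rnhStep2 (s : PySem.Dict Int (List Int) × Int × List Int) (ni : List Int) :
    PySem.Dict Int (List Int) × Int × List Int :=
  if ni = [] then s
  else
    let d := s.1.insert s.2.1 (remove_repetidos ni)
    if s.2.1 = 1 then (d.insert 1 (s.2.2 ++ ni), s.2.1, s.2.2 ++ ni)
    else (d, s.2.1 - 1, s.2.2)

def returnNiv_Hot (hot : List Int) : List (Int × List Int) :=
  let st := (PySem.List.enumerate hot).foldl (rnhStep hot) ([], [])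
  let geral := st.1 ++ [st.2]
  ((geral.foldl rnhStep2 (PySem.Dict.empty, 4, [])).1).items

-- ===== PORT B =====
-- loop body of B's single pass; p = (i, x); Python's short-circuit 'i > 0 and hot[i-1] >= x' is the
-- conjunction (0 < i is false on the first element, so the getD 0 default of hot[i-1] is never used);
-- buckets.setdefault(key, []).append(x) = overwrite key in place with its old value (default []) ++ [x]
def rnhLabel (hot : List Int) (s : PySem.Dict Int (List Int) × Int) (p : Int × Int) :
    PySem.Dict Int (List Int) × Int :=
  let rid := if 0 < p.1 ∧ (PySem.List.pyGet? hot (p.1 - 1)).getD 0 ≥ p.2 then s.2 + 1 else s.2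
  (s.1.insert (max (4 - rid) 1) (s.1.getD (max (4 - rid) 1) [] ++ [p.2]), rid)

-- final dict comprehension: keys are distinct and keep insertion order, so it is a map over items
def returnNiv_Hot_alt (hot : List Int) : List (Int × List Int) :=
  let buckets := ((PySem.List.enumerate hot).foldl (rnhLabel hot) (PySem.Dict.empty, 0)).1
  buckets.items.map (fun kv =>
    (kv.1, if 1 < kv.1 then PySem.List.sorted (PySem.Set.ofList kv.2) (fun x => x) false else kv.2))

-- ===== PRECONDITION & SPEC =====
def Spec_returnNiv_Hot (hot : List Int) (out : List (Int × List Int)) : Prop := out = returnNiv_Hot_alt hot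
instance (hot : List Int) (out : List (Int × List Int)) : Decidable (Spec_returnNiv_Hot hot out) := by unfold Spec_returnNiv_Hot; infer_instance

-- ===== CLAIM (what is proved, stated in full; the proofs are below) =====
def Claim_equal_returnNiv_Hot : Prop := ∀ (hot : List Int), Dom_returnNiv_Hot hot → Spec_returnNiv_Hot hot (returnNiv_Hot hot)

-- ===== LEMMAS AND PROOFS =====

-- peel the maximal strictly-increasing continuation of a run whose last element is p
def pvPeel : Int → List Int → List Int × List Int
  | _, [] => ([], [])
  | p, x :: xs => if p < x then (x :: (pvPeel x xs).1, (pvPeel x xs).2) else ([], x :: xs)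

theorem pvPeel_snd_length_le (p : Int) (xs : List Int) : (pvPeel p xs).2.length ≤ xs.length := by
  induction xs generalizing p with
  | nil => simp [pvPeel]
  | cons x xs ih =>
    simp only [pvPeel]
    split
    · exact le_trans (ih x) (by simp)
    · simp

-- the maximal strictly-increasing runs of a list, peeled off the front
def pvRuns : List Int → List (List Int)
  | [] => []
  | x :: xs => (x :: (pvPeel x xs).1) :: pvRuns (pvPeel x xs).2
termination_by l => l.length
decreasing_by have := pvPeel_snd_length_le x xs; simpa using Nat.lt_succ_of_le this

-- A's accumulator machine: pending run aux (nonempty, last element p), remaining input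
def pvRunsAux (aux : List Int) (p : Int) : List Int → List (List Int)
  | [] => [aux]
  | x :: xs => if p < x then pvRunsAux (aux ++ [x]) x xs else aux :: pvRunsAux [x] x xs

-- A's per-run dict update as a fold body; state = (nivel_hotel, idx)
def rnhStep2B (s : PySem.Dict Int (List Int) × Int) (run : List Int) :
    PySem.Dict Int (List Int) × Int :=
  ((if s.2 < 3 then
      s.1.insert (4 - s.2) (PySem.List.sorted (PySem.Set.ofList run) (fun x => x) false)
    else s.1.insert 1 (s.1.getD 1 [] ++ run)), s.2 + 1)

-- B's per-run dict update; state = (buckets, idx)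
def rnhBucket (s : PySem.Dict Int (List Int) × Int) (run : List Int) :
    PySem.Dict Int (List Int) × Int :=
  (s.1.insert (max (4 - s.2) 1) (s.1.getD (max (4 - s.2) 1) [] ++ run), s.2 + 1)

theorem remove_repetidos_eq (lista : List Int) :
    remove_repetidos lista = PySem.List.sorted (PySem.Set.ofList lista) (fun x => x) false := rfl

theorem pvRunsAux_eq (xs : List Int) (p : Int) (aux : List Int) :
    pvRunsAux aux p xs = (aux ++ (pvPeel p xs).1) :: pvRuns (pvPeel p xs).2 := by
  induction xs generalizing p aux with
  | nil => simp [pvRunsAux, pvPeel, pvRuns]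
  | cons x xs ih =>
    simp only [pvRunsAux, pvPeel]
    split
    · rw [ih x (aux ++ [x])]; simp
    · rw [ih x [x]]; rw [pvRuns]; simp

theorem pvRuns_ne_nil (l : List Int) (r : List Int) (hr : r ∈ pvRuns l) : r ≠ [] := by
  induction l using pvRuns.induct with
  | case1 => simp [pvRuns] at hr
  | case2 x xs ih =>
    rw [pvRuns] at hr
    rcases List.mem_cons.mp hr with h | h
    · simp [h]
    · exact ih h

-- A's first loop, from position k+1 on, with pending aux ending in p = hot[k]
theorem phase1_eq (hot : List Int) (suffix : List Int) (k : Nat) (p : Int)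
    (g : List (List Int)) (aux : List Int) (ha : aux ≠ [])
    (hd : hot.drop k = p :: suffix) :
    (let st := (PySem.List.enumerate suffix ((k : Int) + 1)).foldl (rnhStep hot) (g, aux)
     (st.1 ++ [st.2]).filter (fun r => !r.isEmpty)) =
      g.filter (fun r => !r.isEmpty) ++ pvRunsAux aux p suffix := by
  induction suffix generalizing k p g aux with
  | nil =>
    show ((g ++ [aux]).filter (fun r => !r.isEmpty)) = _
    rw [pvRunsAux, List.filter_append]
    congr 1
    simp [ha]
  | cons x xs ih =>
    have hp : PySem.List.pyGet? hot ((k : Int) + 1 - 1) = some p := by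
      have hE : ((k : Int) + 1 - 1) = (k : Int) := by ring
      have h0 : hot[k]? = some p := by
        have h : (hot.drop k)[0]? = hot[k + 0]? := List.getElem?_drop
        rw [hd] at h
        simpa using h.symm
      rw [hE, PySem.List.pyGet?_natCast, h0]
    have hd' : hot.drop (k + 1) = x :: xs := by
      have h : hot.drop (k + 1) = (hot.drop k).drop 1 := by rw [List.drop_drop]
      rw [h, hd]
      rfl
    show ((((PySem.List.enumerate (x :: xs) ((k : Int) + 1)).foldl (rnhStep hot) (g, aux)).1 ++
      [((PySem.List.enumerate (x :: xs) ((k : Int) + 1)).foldl (rnhStep hot) (g, aux)).2]).filter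
        (fun r => !r.isEmpty)) = _
    rw [PySem.List.enumerate_cons]
    simp only [List.foldl_cons]
    by_cases hc : p < x
    · have hstep : rnhStep hot (g, aux) ((k : Int) + 1, x) = (g, aux ++ [x]) := by
        rw [rnhStep]
        simp only [hp, Option.getD_some]
        rw [if_pos hc]
      rw [hstep]
      have hrec := ih (k + 1) x g (aux ++ [x]) (by simp) hd'
      have hcast : (((k + 1 : Nat) : Int) + 1) = ((k : Int) + 1 + 1) := by push_cast; ring
      rw [hcast] at hrec
      rw [hrec, pvRunsAux, if_pos hc]
    · have hstep : rnhStep hot (g, aux) ((k : Int) + 1, x) = (g ++ [aux], [x]) := by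
        rw [rnhStep]
        simp only [hp, Option.getD_some]
        rw [if_neg hc]
      rw [hstep]
      have hrec := ih (k + 1) x (g ++ [aux]) [x] (by simp) hd'
      have hcast : (((k + 1 : Nat) : Int) + 1) = ((k : Int) + 1 + 1) := by push_cast; ring
      rw [hcast] at hrec
      rw [hrec, pvRunsAux, if_neg hc]
      rw [List.filter_append]
      simp [ha]

-- A's second loop skips empty runs
theorem phase2_filter (l : List (List Int)) (s : PySem.Dict Int (List Int) × Int × List Int) :
    l.foldl rnhStep2 s = (l.filter (fun r => !r.isEmpty)).foldl rnhStep2 s := by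
  induction l generalizing s with
  | nil => rfl
  | cons r l ih =>
    by_cases hr : r = []
    · subst hr
      simpa [rnhStep2] using ih s
    · have hb : (!r.isEmpty) = true := by simpa using hr
      simp only [List.foldl_cons, List.filter_cons, hb, if_pos, List.foldl_cons]
      exact ih (rnhStep2 s r)

-- A's second loop = the per-run fold, related by nivel = max (4 - idx) 1 and level-1 accumulator = stored value
theorem phase2_eq (rs : List (List Int)) (hne : ∀ r ∈ rs, r ≠ [])
    (d : PySem.Dict Int (List Int)) (idx : Int) (nl1 : List Int) (hidx : 0 ≤ idx)
    (h1 : d.getD 1 [] = nl1) (h2 : idx < 3 → nl1 = []) :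
    (rs.foldl rnhStep2 (d, max (4 - idx) 1, nl1)).1 = (rs.foldl rnhStep2B (d, idx)).1 := by
  induction rs generalizing d idx nl1 with
  | nil => rfl
  | cons r rs ih =>
    have hr : r ≠ [] := hne r (List.mem_cons_self ..)
    have hne' : ∀ r' ∈ rs, r' ≠ [] := fun r' h => hne r' (List.mem_cons_of_mem _ h)
    simp only [List.foldl_cons]
    by_cases hlt : idx < 3
    · have hmax : max (4 - idx) 1 = 4 - idx := by omega
      have hstep : rnhStep2 (d, max (4 - idx) 1, nl1) r =
          (d.insert (4 - idx) (remove_repetidos r), max (4 - (idx + 1)) 1, nl1) := by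
        rw [rnhStep2, if_neg hr, hmax]
        simp only []
        rw [if_neg (by omega)]
        have : 4 - idx - 1 = max (4 - (idx + 1)) 1 := by omega
        rw [this]
      have hstepB : rnhStep2B (d, idx) r =
          (d.insert (4 - idx) (remove_repetidos r), idx + 1) := by
        rw [rnhStep2B, remove_repetidos_eq]
        simp only [if_pos hlt]
      rw [hstep, hstepB]
      exact ih hne' _ (idx + 1) nl1 (by omega)
        (by rw [PySem.Dict.getD_insert_of_ne d _ _ (by omega : (1:Int) ≠ 4 - idx), h1])
        (fun h => h2 hlt)
    · have hmax : max (4 - idx) 1 = 1 := by omega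
      have hstep : rnhStep2 (d, max (4 - idx) 1, nl1) r =
          (d.insert 1 (nl1 ++ r), max (4 - (idx + 1)) 1, nl1 ++ r) := by
        rw [rnhStep2, if_neg hr, hmax]
        simp only [↓reduceIte]
        rw [PySem.Dict.insert_insert_self d 1 _ _]
        have : (1 : Int) = max (4 - (idx + 1)) 1 := by omega
        exact congrArg (fun v => (d.insert 1 (nl1 ++ r), v, nl1 ++ r)) this
      have hstepB : rnhStep2B (d, idx) r = (d.insert 1 (nl1 ++ r), idx + 1) := by
        rw [rnhStep2B]
        simp only [if_neg hlt, h1]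
      rw [hstep, hstepB]
      exact ih hne' _ (idx + 1) (nl1 ++ r) (by omega)
        (by rw [PySem.Dict.getD_insert_self d 1 _ _]) (fun h => absurd h (by omega))

-- B's labeling pass, from position k+1 on, current run so far aux under key max(4-rid,1), p = hot[k]
theorem phase1B (hot : List Int) (suffix : List Int) (k : Nat) (p : Int)
    (d0 : PySem.Dict Int (List Int)) (rid : Int) (aux : List Int)
    (hd : hot.drop k = p :: suffix) :
    ((PySem.List.enumerate suffix ((k : Int) + 1)).foldl (rnhLabel hot)
        (d0.insert (max (4 - rid) 1) (d0.getD (max (4 - rid) 1) [] ++ aux), rid)).1 =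
      ((pvRuns (pvPeel p suffix).2).foldl rnhBucket
        (d0.insert (max (4 - rid) 1)
          (d0.getD (max (4 - rid) 1) [] ++ (aux ++ (pvPeel p suffix).1)), rid + 1)).1 := by
  induction suffix generalizing k p d0 rid aux with
  | nil => simp [pvPeel, pvRuns]
  | cons x xs ih =>
    have hp : PySem.List.pyGet? hot ((k : Int) + 1 - 1) = some p := by
      have hE : ((k : Int) + 1 - 1) = (k : Int) := by ring
      have h0 : hot[k]? = some p := by
        have h : (hot.drop k)[0]? = hot[k + 0]? := List.getElem?_drop
        rw [hd] at h
        simpa using h.symm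
      rw [hE, PySem.List.pyGet?_natCast, h0]
    have hd' : hot.drop (k + 1) = x :: xs := by
      have h : hot.drop (k + 1) = (hot.drop k).drop 1 := by rw [List.drop_drop]
      rw [h, hd]
      rfl
    rw [PySem.List.enumerate_cons]
    simp only [List.foldl_cons]
    by_cases hc : p < x
    · have hstep : rnhLabel hot
          (d0.insert (max (4 - rid) 1) (d0.getD (max (4 - rid) 1) [] ++ aux), rid)
          ((k : Int) + 1, x) =
          (d0.insert (max (4 - rid) 1) (d0.getD (max (4 - rid) 1) [] ++ (aux ++ [x])), rid) := by
        rw [rnhLabel]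
        simp only [hp, Option.getD_some]
        rw [if_neg (by intro h; omega)]
        rw [PySem.Dict.getD_insert_self, PySem.Dict.insert_insert_self, List.append_assoc]
      rw [hstep]
      have hrec := ih (k + 1) x d0 rid (aux ++ [x]) hd'
      have hcast : (((k + 1 : Nat) : Int) + 1) = ((k : Int) + 1 + 1) := by push_cast; ring
      rw [hcast] at hrec
      rw [hrec]
      simp only [pvPeel, if_pos hc, List.append_assoc, List.singleton_append]
    · have hstep : rnhLabel hot
          (d0.insert (max (4 - rid) 1) (d0.getD (max (4 - rid) 1) [] ++ aux), rid)
          ((k : Int) + 1, x) =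
          ((d0.insert (max (4 - rid) 1) (d0.getD (max (4 - rid) 1) [] ++ aux)).insert
              (max (4 - (rid + 1)) 1)
              ((d0.insert (max (4 - rid) 1) (d0.getD (max (4 - rid) 1) [] ++ aux)).getD
                (max (4 - (rid + 1)) 1) [] ++ [x]), rid + 1) := by
        rw [rnhLabel]
        simp only [hp, Option.getD_some]
        rw [if_pos ⟨by positivity, by omega⟩]
      rw [hstep]
      have hrec := ih (k + 1) x
        (d0.insert (max (4 - rid) 1) (d0.getD (max (4 - rid) 1) [] ++ aux)) (rid + 1) [x] hd'
      have hcast : (((k + 1 : Nat) : Int) + 1) = ((k : Int) + 1 + 1) := by push_cast; ring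
      rw [hcast] at hrec
      rw [hrec]
      simp only [pvPeel, if_neg hc]
      rw [pvRuns]
      simp only [List.foldl_cons, List.append_nil, rnhBucket, List.singleton_append]

-- B's port as a fold of rnhBucket over the runs
theorem altB_eq (hot : List Int) :
    returnNiv_Hot_alt hot =
      (((pvRuns hot).foldl rnhBucket (PySem.Dict.empty, 0)).1).items.map (fun kv =>
        (kv.1, if 1 < kv.1 then PySem.List.sorted (PySem.Set.ofList kv.2) (fun x => x) false
          else kv.2)) := by
  cases hot with
  | nil => simp [returnNiv_Hot_alt, pvRuns]
  | cons x xs =>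
    rw [returnNiv_Hot_alt]
    show (((PySem.List.enumerate (x :: xs) 0).foldl (rnhLabel (x :: xs))
        (PySem.Dict.empty, 0)).1).items.map _ = _
    rw [PySem.List.enumerate_cons]
    simp only [List.foldl_cons]
    have hstep : rnhLabel (x :: xs) (PySem.Dict.empty, 0) (0, x) =
        (PySem.Dict.empty.insert (max (4 - 0) 1)
          ((PySem.Dict.empty : PySem.Dict Int (List Int)).getD (max (4 - 0) 1) [] ++ [x]), 0) := by
      rw [rnhLabel]
      rw [if_neg (by intro h; omega)]
    rw [hstep]
    simp only [zero_add]
    have h1 := phase1B (x :: xs) xs 0 x PySem.Dict.empty 0 [x] rfl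
    simp only [Nat.cast_zero, zero_add] at h1
    rw [h1]
    rw [pvRuns]
    simp only [List.foldl_cons, rnhBucket, List.singleton_append]
    rfl

-- for idx ≥ 3 every A-side step extends key 1 in place
theorem tailA (rest : List (List Int)) (d : PySem.Dict Int (List Int)) (acc : List Int)
    (idx : Int) (h : ¬ idx < 3) :
    (rest.foldl rnhStep2B (d.insert 1 acc, idx)).1 = d.insert 1 (acc ++ rest.flatten) := by
  induction rest generalizing acc idx with
  | nil => simp
  | cons r rest ih =>
    simp only [List.foldl_cons, rnhStep2B, if_neg h]
    rw [PySem.Dict.getD_insert_self, PySem.Dict.insert_insert_self]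
    rw [ih (acc ++ r) (idx + 1) (by omega)]
    simp

-- for idx ≥ 3 every B-side step extends key 1 in place
theorem tailB (rest : List (List Int)) (d : PySem.Dict Int (List Int)) (acc : List Int)
    (idx : Int) (h : ¬ idx < 3) :
    (rest.foldl rnhBucket (d.insert 1 acc, idx)).1 = d.insert 1 (acc ++ rest.flatten) := by
  induction rest generalizing acc idx with
  | nil => simp
  | cons r rest ih =>
    have hmax : max (4 - idx) 1 = 1 := by omega
    simp only [List.foldl_cons, rnhBucket, hmax]
    rw [PySem.Dict.getD_insert_self, PySem.Dict.insert_insert_self]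
    rw [ih (acc ++ r) (idx + 1) (by omega)]
    simp

-- the two per-run folds produce the same items after B's post-pass
theorem foldEq (rs : List (List Int)) :
    ((rs.foldl rnhStep2B (PySem.Dict.empty, 0)).1).items =
      (((rs.foldl rnhBucket (PySem.Dict.empty, 0)).1).items).map (fun kv =>
        (kv.1, if 1 < kv.1 then PySem.List.sorted (PySem.Set.ofList kv.2) (fun x => x) false
          else kv.2)) := by
  rcases rs with _ | ⟨r0, _ | ⟨r1, _ | ⟨r2, _ | ⟨r3, rest⟩⟩⟩⟩
  · rfl
  · simp [rnhStep2B, rnhBucket, PySem.Dict.items_insert, PySem.Dict.contains_empty,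
      PySem.Dict.getD_empty]
    rfl
  · simp [rnhStep2B, rnhBucket, PySem.Dict.items_insert, PySem.Dict.contains_insert,
      PySem.Dict.getD_insert, PySem.Dict.contains_empty, PySem.Dict.getD_empty]
    rfl
  · simp [rnhStep2B, rnhBucket, PySem.Dict.items_insert, PySem.Dict.contains_insert,
      PySem.Dict.getD_insert, PySem.Dict.contains_empty, PySem.Dict.getD_empty]
    rfl
  · simp only [List.foldl_cons, rnhStep2B, rnhBucket]
    norm_num
    rw [tailA rest _ _ 4 (by norm_num), tailB rest _ _ 4 (by norm_num)]
    simp [PySem.Dict.items_insert, PySem.Dict.contains_insert, PySem.Dict.getD_insert,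
      PySem.Dict.contains_empty, PySem.Dict.getD_empty]
    rfl

-- ===== VERDICT (by name: the statement is the Claim_ definition above) =====
theorem returnNiv_Hot_spec : Claim_equal_returnNiv_Hot := by
  unfold Claim_equal_returnNiv_Hot
  intro hot _
  unfold Spec_returnNiv_Hot
  rw [altB_eq, ← foldEq]
  cases hot with
  | nil => simp [returnNiv_Hot, pvRuns, rnhStep2]
  | cons x xs =>
    rw [returnNiv_Hot]
    have hruns : pvRuns (x :: xs) = (x :: (pvPeel x xs).1) :: pvRuns (pvPeel x xs).2 := by
      rw [pvRuns]
    obtain ⟨g0, hg0, hstep⟩ :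
        ∃ g0 : List (List Int), g0.filter (fun r => !r.isEmpty) = [] ∧
          rnhStep (x :: xs) ([], []) (0, x) = (g0, [x]) := by
      by_cases hc : (PySem.List.pyGet? (x :: xs) (-1)).getD 0 < x
      · refine ⟨[], rfl, ?_⟩
        rw [rnhStep]
        norm_num [hc]
      · refine ⟨[[]], rfl, ?_⟩
        rw [rnhStep]
        norm_num [hc]
    have h1 := phase1_eq (x :: xs) xs 0 x g0 [x] (by simp) rfl
    rw [hg0] at h1
    simp only [Nat.cast_zero, List.nil_append] at h1
    show ((((PySem.List.enumerate (x :: xs) 0).foldl (rnhStep (x :: xs)) ([], [])).1 ++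
        [((PySem.List.enumerate (x :: xs) 0).foldl (rnhStep (x :: xs)) ([], [])).2]).foldl
          rnhStep2 (PySem.Dict.empty, 4, [])).1.items = _
    rw [PySem.List.enumerate_cons]
    simp only [List.foldl_cons, hstep]
    rw [phase2_filter, h1, pvRunsAux_eq]
    simp only [List.singleton_append]
    rw [← hruns]
    have h4 : ((PySem.Dict.empty : PySem.Dict Int (List Int)), (4 : Int), ([] : List Int)) =
        (PySem.Dict.empty, max (4 - (0 : Int)) 1, ([] : List Int)) := by norm_num
    rw [h4]
    exact congrArg PySem.Dict.items
      (phase2_eq (pvRuns (x :: xs)) (fun r hr => pvRuns_ne_nil _ r hr)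
        PySem.Dict.empty 0 [] (by norm_num) rfl (fun _ => rfl))
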